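-- pv_equiv track=rewrite | github.com/dfu3/Email-Bot | responder.py | parse_unit_and_actions
-- ===== SOURCE A (Python) =====
-- def parse_unit_and_actions(action_data):
--     unit = ""
--     actions = []
--
--     for line in action_data.strip().splitlines():
--         if line.startswith("UNIT="):
--             unit = line[len("UNIT="):].strip()
--         elif line.startswith("ACTIONS="):
--             actions = [a.strip() for a in line[len("ACTIONS="):].split(",") if a.strip()]
--
--     return unit, actions
-- ===== SOURCE B (Python) =====
-- def parse_unit_and_actions(action_data):
--     config = {}
--     for line in action_data.strip().splitlines():
--         i = line.find("=")
--         if i != -1: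
--             config[line[:i]] = line[i + 1:]
--     unit = config.get("UNIT", "").strip()
--     actions = [a.strip() for a in config.get("ACTIONS", "").split(",") if a.strip()]
--     return unit, actions
-- ===== Notes on version B (the rewrite author's own statement) =====
-- stated objective: idiomatic
-- what changed: B replaces A's per-line UNIT=/ACTIONS= prefix branching and in-loop value parsing by one generic pass that splits each line at its first equals sign into a last-write-wins dict, with the UNIT and ACTIONS lookups (strip / comma-split) done once after the loop.
import Mathlib
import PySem

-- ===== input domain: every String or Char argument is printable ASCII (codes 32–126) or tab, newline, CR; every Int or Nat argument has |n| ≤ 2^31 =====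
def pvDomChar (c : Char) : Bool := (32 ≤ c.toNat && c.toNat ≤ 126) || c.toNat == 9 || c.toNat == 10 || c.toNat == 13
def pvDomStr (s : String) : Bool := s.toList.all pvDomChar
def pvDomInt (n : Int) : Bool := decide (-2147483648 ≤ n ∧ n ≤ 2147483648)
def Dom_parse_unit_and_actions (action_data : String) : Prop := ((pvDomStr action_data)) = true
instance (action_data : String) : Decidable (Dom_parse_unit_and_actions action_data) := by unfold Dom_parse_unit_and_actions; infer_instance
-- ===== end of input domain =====

-- B replaces A's per-line prefix branching by one generic 'key=value' dict pass (last write wins)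
-- with the UNIT/ACTIONS lookups done once afterwards; objective: idiomatic, same cost.

-- [a.strip() for a in v.split(",") if a.strip()] — the identical comprehension both Pythons contain
def pvActionList (v : String) : List String :=
  ((PySem.Str.split? v ",").getD []).filterMap (fun a =>
    let t := PySem.Str.strip a
    if t = "" then none else some t)

-- ===== PORT A =====
def pvStepA (st : String × List String) (line : String) : String × List String :=
  if PySem.Str.startswith line "UNIT=" then
    (PySem.Str.strip (PySem.Str.slice line (some 5) none), st.2)
  else if PySem.Str.startswith line "ACTIONS=" then
    (st.1, pvActionList (PySem.Str.slice line (some 8) none))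
  else st

def parse_unit_and_actions (action_data : String) : String × List String :=
  (PySem.Str.splitlines (PySem.Str.strip action_data)).foldl pvStepA ("", [])

-- ===== PORT B =====
def pvStepB (d : PySem.Dict String String) (line : String) : PySem.Dict String String :=
  let i := PySem.Str.find line "="
  if i ≠ -1 then
    d.insert (PySem.Str.slice line none (some i)) (PySem.Str.slice line (some (i + 1)) none)
  else d

def parse_unit_and_actions_alt (action_data : String) : String × List String :=
  let config : PySem.Dict String String :=
    (PySem.Str.splitlines (PySem.Str.strip action_data)).foldl pvStepB PySem.Dict.empty
  (PySem.Str.strip (config.getD "UNIT" ""), pvActionList (config.getD "ACTIONS" ""))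

-- ===== PRECONDITION & SPEC =====
def Spec_parse_unit_and_actions (action_data : String) (out : String × List String) : Prop := out = parse_unit_and_actions_alt action_data
instance (action_data : String) (out : String × List String) : Decidable (Spec_parse_unit_and_actions action_data out) := by unfold Spec_parse_unit_and_actions; infer_instance

-- ===== CLAIM (what is proved, stated in full; the proofs are below) =====
def Claim_equal_parse_unit_and_actions : Prop := ∀ (action_data : String), Dom_parse_unit_and_actions action_data → Spec_parse_unit_and_actions action_data (parse_unit_and_actions action_data)

-- ===== LEMMAS AND PROOFS =====

-- first '=' in "UNIT=…" is at index 4, in "ACTIONS=…" at index 7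
theorem pv_find_unit (t : List Char) :
    PySem.Chars.find ("UNIT=".toList ++ t) "=".toList = 4 := by
  show PySem.Chars.find (['U','N','I','T','='] ++ t) ['='] = 4
  simp [PySem.Chars.find, PySem.Chars.find.go]

theorem pv_find_actions (t : List Char) :
    PySem.Chars.find ("ACTIONS=".toList ++ t) "=".toList = 7 := by
  show PySem.Chars.find (['A','C','T','I','O','N','S','='] ++ t) ['='] = 7
  simp [PySem.Chars.find, PySem.Chars.find.go]

-- a line whose text before the first '=' is `key` starts with `key ++ "="`
theorem pv_key_startswith (line key : String) (i : Int)
    (hfind : PySem.Str.find line "=" = i) (hi : 0 ≤ i)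
    (hkey : PySem.Str.slice line none (some i) = key) :
    PySem.Str.startswith line (key ++ "=") = true := by
  have hfl : PySem.Chars.find line.toList "=".toList = i := by
    simpa using hfind
  have hspec := PySem.Chars.find_spec (s := line.toList) (sub := "=".toList) (by omega)
  rw [hfl] at hspec
  obtain ⟨r, hr⟩ := hspec.1
  have hk : List.take i.toNat line.toList = key.toList := by
    have h := congrArg String.toList hkey
    rw [PySem.Str.toList_slice, PySem.Chars.slice_eq_listSlice,
      PySem.List.slice_to _ hi] at h
    exact h
  have hline : line.toList = key.toList ++ ('=' :: r) := by
    have h2 := List.take_append_drop i.toNat line.toList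
    rw [hk, ← hr] at h2
    exact h2.symm
  rw [PySem.Str.startswith_eq, PySem.Chars.startswith_iff, hline]
  exact ⟨r, by simp⟩

-- one step of A's fold mirrors one step of B's dict fold through the two lookups
theorem pv_step (d : PySem.Dict String String) (line : String) :
    pvStepA (PySem.Str.strip (d.getD "UNIT" ""), pvActionList (d.getD "ACTIONS" "")) line =
      (PySem.Str.strip ((pvStepB d line).getD "UNIT" ""),
       pvActionList ((pvStepB d line).getD "ACTIONS" "")) := by
  by_cases h1 : PySem.Str.startswith line "UNIT=" = true
  · -- UNIT= line
    have hpre : "UNIT=".toList <+: line.toList := by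
      rw [PySem.Str.startswith_eq, PySem.Chars.startswith_iff] at h1
      exact h1
    obtain ⟨t, ht⟩ := hpre
    have hfind : PySem.Str.find line "=" = 4 := by
      rw [PySem.Str.find_eq, ← ht, pv_find_unit]
    have hkey : PySem.Str.slice line none (some 4) = "UNIT" := by
      apply String.ext
      rw [PySem.Str.toList_slice, PySem.Chars.slice_eq_listSlice,
        PySem.List.slice_to _ (by norm_num), ← ht]
      rfl
    simp only [pvStepA, pvStepB, h1, if_true, hfind]
    rw [if_pos (by norm_num), hkey, PySem.Dict.getD_insert_self,
      PySem.Dict.getD_insert_of_ne _ _ _ (by decide : ("ACTIONS" : String) ≠ "UNIT")]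
    norm_num
  · by_cases h2 : PySem.Str.startswith line "ACTIONS=" = true
    · -- ACTIONS= line
      have hpre : "ACTIONS=".toList <+: line.toList := by
        rw [PySem.Str.startswith_eq, PySem.Chars.startswith_iff] at h2
        exact h2
      obtain ⟨t, ht⟩ := hpre
      have hfind : PySem.Str.find line "=" = 7 := by
        rw [PySem.Str.find_eq, ← ht, pv_find_actions]
      have hkey : PySem.Str.slice line none (some 7) = "ACTIONS" := by
        apply String.ext
        rw [PySem.Str.toList_slice, PySem.Chars.slice_eq_listSlice,
          PySem.List.slice_to _ (by norm_num), ← ht]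
        rfl
      simp only [pvStepA, pvStepB, h1, if_false, Bool.false_eq_true, h2, if_true, hfind]
      rw [if_pos (by norm_num), hkey, PySem.Dict.getD_insert_self,
        PySem.Dict.getD_insert_of_ne _ _ _ (by decide : ("UNIT" : String) ≠ "ACTIONS")]
      norm_num
    · -- other lines: A keeps its state; B's insert (if any) touches neither key
      simp only [pvStepA, pvStepB]
      rw [if_neg h1, if_neg h2]
      by_cases hf : PySem.Str.find line "=" = -1
      · rw [if_neg (not_not_intro hf)]
      · have hi : 0 ≤ PySem.Str.find line "=" := by
          have := PySem.Chars.neg_one_le_find line.toList "=".toList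
          rw [PySem.Str.find_eq] at hf ⊢
          omega
        have hne1 : PySem.Str.slice line none (some (PySem.Str.find line "=")) ≠ "UNIT" := by
          intro heq
          exact h1 (pv_key_startswith line "UNIT" _ rfl hi heq)
        have hne2 : PySem.Str.slice line none (some (PySem.Str.find line "=")) ≠ "ACTIONS" := by
          intro heq
          exact h2 (pv_key_startswith line "ACTIONS" _ rfl hi heq)
        rw [if_pos hf,
          PySem.Dict.getD_insert_of_ne _ _ _ (Ne.symm hne1),
          PySem.Dict.getD_insert_of_ne _ _ _ (Ne.symm hne2)]

-- the fold invariant: A's running pair is B's dict read through the two lookups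
theorem pv_inv (lines : List String) (d : PySem.Dict String String) :
    lines.foldl pvStepA
        (PySem.Str.strip (d.getD "UNIT" ""), pvActionList (d.getD "ACTIONS" "")) =
      (PySem.Str.strip ((lines.foldl pvStepB d).getD "UNIT" ""),
       pvActionList ((lines.foldl pvStepB d).getD "ACTIONS" "")) := by
  induction lines generalizing d with
  | nil => rfl
  | cons line rest ih =>
    simp only [List.foldl_cons]
    rw [pv_step d line]
    exact ih (pvStepB d line)

-- ===== VERDICT (by name: the statement is the Claim_ definition above) =====
theorem parse_unit_and_actions_spec : Claim_equal_parse_unit_and_actions := by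
  intro action_data _
  unfold Spec_parse_unit_and_actions parse_unit_and_actions parse_unit_and_actions_alt
  rw [show (("", []) : String × List String) =
      (PySem.Str.strip ((PySem.Dict.empty : PySem.Dict String String).getD "UNIT" ""),
       pvActionList ((PySem.Dict.empty : PySem.Dict String String).getD "ACTIONS" "")) from rfl]
  exact pv_inv _ _
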